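-- pv_equiv track=rewrite | github.com/timthecyborg/aws-python-lambda | awsPrimesPy/hello_world/app.py | NextNPrimesUnderTenThousand
-- ===== SOURCE A (Python) =====
-- import math
--
-- MAX_VALUE = 10000
--
-- def NextNPrimesUnderTenThousand(startingnumber, primesToSkip):
--     # Mark all numbers as prime
--     list_numbers = MAX_VALUE * [True]
--
--     # 0 and 1 not primes
--     list_numbers[0] = list_numbers[1] = False
--
--     square_root = int(math.sqrt(MAX_VALUE))
--
--     for p in range(square_root) :
--         if (list_numbers[p] == True) :
--             for i in range (p*p, MAX_VALUE, p) :
--                 # Cross out non primes by marking them false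
--                 list_numbers[i] = False
--     count = 0
--     for p in range(startingnumber,len(list_numbers)) :
--         if(list_numbers[p] == True) :
--            count += 1
--            if(count == primesToSkip):
--             return p
-- ===== SOURCE B (Python) =====
-- import math
--
-- MAX_VALUE = 10000
--
-- def NextNPrimesUnderTenThousand(startingnumber, primesToSkip):
--     # Primality table built by trial division instead of a sieve (identical table).
--     list_numbers = [n >= 2 and all(n % d for d in range(2, math.isqrt(n) + 1))
--                     for n in range(MAX_VALUE)]
--     count = 0
--     for p in range(startingnumber, len(list_numbers)):
--         if list_numbers[p]:
--             count += 1
--             if count == primesToSkip: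
--                 return p
-- ===== Notes on version B (the rewrite author's own statement) =====
-- stated objective: alternative
-- what changed: B builds the 10000-entry primality table by per-number trial division (n >= 2 and no divisor d with 2 <= d <= isqrt(n)) instead of the Sieve of Eratosthenes, keeping the final scanning loop identical.
import Mathlib
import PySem

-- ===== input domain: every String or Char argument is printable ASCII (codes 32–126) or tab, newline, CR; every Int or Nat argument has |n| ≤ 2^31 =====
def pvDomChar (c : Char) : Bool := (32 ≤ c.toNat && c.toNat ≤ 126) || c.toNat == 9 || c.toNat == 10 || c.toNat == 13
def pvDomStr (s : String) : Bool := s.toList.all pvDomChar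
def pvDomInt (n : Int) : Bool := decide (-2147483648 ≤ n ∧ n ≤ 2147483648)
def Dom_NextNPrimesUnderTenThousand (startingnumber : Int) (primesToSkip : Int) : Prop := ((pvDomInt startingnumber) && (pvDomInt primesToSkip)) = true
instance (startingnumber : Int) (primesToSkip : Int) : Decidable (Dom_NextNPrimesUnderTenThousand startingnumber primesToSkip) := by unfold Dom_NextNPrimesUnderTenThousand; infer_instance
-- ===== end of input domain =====

-- B replaces the Sieve of Eratosthenes by per-number trial division when building the
-- primality table; the final scanning loop (with Python's negative-index wraparound) is
-- unchanged. Objective: alternative (a genuinely different table-building algorithm).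

-- ===== PORT A =====
-- final loop of both Pythons (their code there is identical):
--   'for p in range(startingnumber, len(list_numbers)): if list_numbers[p] == True: count += 1; if count == primesToSkip: return p'
-- list_numbers[p] is PySem.List.pyGet? (negative p wraps); '.getD false' is only reached
-- when pyGet? = some _, because Pre_ excludes startingnumber < -10000 (Python: IndexError).
def pvScan (l : List Bool) (primesToSkip : Int) : List Int → Int → Option Int
  | [], _ => none
  | p :: rest, count =>
    if (PySem.List.pyGet? l p).getD false = true then
      (if count + 1 = primesToSkip then some p else pvScan l primesToSkip rest (count + 1))
    else pvScan l primesToSkip rest count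

-- 'list_numbers = MAX_VALUE * [True]; list_numbers[0] = list_numbers[1] = False'
def pvL0 : List Bool := ((List.replicate 10000 true).set 0 false).set 1 false

-- 'for i in range(p*p, MAX_VALUE, p): list_numbers[i] = False'
-- (every index i here is nonnegative, so .toNat is exact)
def pvCrossOut (l : List Bool) (p : Int) : List Bool :=
  (PySem.List.pyRange (p * p) 10000 p).foldl (fun a i => a.set i.toNat false) l

-- one iteration of 'for p in range(square_root): if list_numbers[p] == True: ...'
-- (p ∈ [0, 100) is always in range, so pyGetD is exact for 'list_numbers[p]')
def pvSieveStep (acc : List Bool) (p : Int) : List Bool :=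
  if PySem.List.pyGetD acc p false = true then pvCrossOut acc p else acc

-- 'square_root = int(math.sqrt(10000)) = 100'
def pvSieve : List Bool := (PySem.List.pyRange 0 100 1).foldl pvSieveStep pvL0

def NextNPrimesUnderTenThousand (startingnumber : Int) (primesToSkip : Int) : Option Int :=
  pvScan pvSieve primesToSkip
    (PySem.List.pyRange startingnumber (pvSieve.length : Int) 1) 0

-- ===== PORT B =====
-- 'n >= 2 and all(n % d for d in range(2, math.isqrt(n) + 1))'  (n ≥ 0 throughout)
def pvIsPrimeTD (n : Int) : Bool :=
  decide (2 ≤ n) &&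
    (PySem.List.pyRange 2 (Int.ofNat (Nat.sqrt n.toNat) + 1) 1).all
      (fun d => decide (¬ PySem.Int.mod n d = 0))

-- '[n >= 2 and all(...) for n in range(MAX_VALUE)]'
def pvTrial : List Bool := (PySem.List.pyRange 0 10000 1).map pvIsPrimeTD

def NextNPrimesUnderTenThousand_alt (startingnumber : Int) (primesToSkip : Int) : Option Int :=
  pvScan pvTrial primesToSkip
    (PySem.List.pyRange startingnumber (pvTrial.length : Int) 1) 0

-- ===== PRECONDITION & SPEC =====
-- Pre_ excludes exactly startingnumber < -10000, where Python A raises IndexError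
-- (list_numbers[p] with p < -len); B raises there identically.
def Pre_NextNPrimesUnderTenThousand (startingnumber : Int) (primesToSkip : Int) : Prop :=
  -10000 ≤ startingnumber
instance (startingnumber : Int) (primesToSkip : Int) : Decidable (Pre_NextNPrimesUnderTenThousand startingnumber primesToSkip) := by unfold Pre_NextNPrimesUnderTenThousand; infer_instance

def pvWitness_NextNPrimesUnderTenThousand : Int × Int := (50, 3)

def Spec_NextNPrimesUnderTenThousand (startingnumber : Int) (primesToSkip : Int) (out : Option Int) : Prop := out = NextNPrimesUnderTenThousand_alt startingnumber primesToSkip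
instance (startingnumber : Int) (primesToSkip : Int) (out : Option Int) : Decidable (Spec_NextNPrimesUnderTenThousand startingnumber primesToSkip out) := by unfold Spec_NextNPrimesUnderTenThousand; infer_instance

-- ===== CLAIM (what is proved, stated in full; the proofs are below) =====
def Claim_equal_NextNPrimesUnderTenThousand : Prop := ∀ (startingnumber : Int) (primesToSkip : Int), Dom_NextNPrimesUnderTenThousand startingnumber primesToSkip → Pre_NextNPrimesUnderTenThousand startingnumber primesToSkip → Spec_NextNPrimesUnderTenThousand startingnumber primesToSkip (NextNPrimesUnderTenThousand startingnumber primesToSkip)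

-- ===== LEMMAS AND PROOFS =====

-- 'j is still unmarked after the sieve has processed 2, …, k-1'
def pvGood (k j : Nat) : Prop := 2 ≤ j ∧ ∀ q, 2 ≤ q → q < k → q ∣ j → ¬ (q * q ≤ j)

theorem pv_foldl_set_getD (is : List Int) (l : List Bool) (j : Nat) (hj : j < l.length) :
    (is.foldl (fun a i => a.set i.toNat false) l).getD j false =
      if ∃ i ∈ is, i.toNat = j then false else l.getD j false := by
  induction is generalizing l with
  | nil => simp
  | cons i t ih =>
    simp only [List.foldl_cons]
    rw [ih _ (by simpa using hj)]
    by_cases h : i.toNat = j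
    · rw [if_pos (show ∃ x ∈ i :: t, x.toNat = j from ⟨i, List.mem_cons_self, h⟩)]
      have hset : (l.set i.toNat false).getD j false = false := by
        rw [List.getD_eq_getElem?_getD, List.getElem?_set, if_pos h, if_pos (h ▸ hj)]
        rfl
      rw [hset]
      split_ifs <;> rfl
    · have hset : (l.set i.toNat false).getD j false = l.getD j false := by
        rw [List.getD_eq_getElem?_getD, List.getElem?_set, if_neg h,
          ← List.getD_eq_getElem?_getD]
      rw [hset]
      have hiff : (∃ x ∈ i :: t, x.toNat = j) ↔ (∃ x ∈ t, x.toNat = j) := by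
        constructor
        · rintro ⟨x, hx, hxj⟩
          rcases List.mem_cons.mp hx with rfl | hx'
          · exact absurd hxj h
          · exact ⟨x, hx', hxj⟩
        · rintro ⟨x, hx, hxj⟩
          exact ⟨x, List.mem_cons_of_mem _ hx, hxj⟩
      by_cases h2 : ∃ x ∈ t, x.toNat = j
      · rw [if_pos h2, if_pos (hiff.mpr h2)]
      · rw [if_neg h2, if_neg (fun hh => h2 (hiff.mp hh))]

theorem pv_foldl_set_length (is : List Int) (l : List Bool) :
    (is.foldl (fun a i => a.set i.toNat false) l).length = l.length := by
  induction is generalizing l with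
  | nil => rfl
  | cons i t ih => simp [List.foldl_cons, ih]

theorem pvCrossOut_length (l : List Bool) (p : Int) : (pvCrossOut l p).length = l.length :=
  pv_foldl_set_length _ _

theorem pvCrossOut_getD (l : List Bool) (p : Int) (hp : 2 ≤ p) (j : Nat)
    (hj : j < 10000) (hlen : l.length = 10000) :
    (pvCrossOut l p).getD j false =
      if p.toNat ∣ j ∧ p.toNat * p.toNat ≤ j then false else l.getD j false := by
  unfold pvCrossOut
  rw [pv_foldl_set_getD _ _ _ (by omega)]
  have hp0 : (0:Int) < p := by omega
  have hpn : ((p.toNat : Int)) = p := Int.toNat_of_nonneg (by omega)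
  have hcond : (∃ i ∈ PySem.List.pyRange (p * p) 10000 p, i.toNat = j) ↔
      ((p.toNat ∣ j ∧ p.toNat * p.toNat ≤ j) ∧ j < 10000) := by
    constructor
    · rintro ⟨i, hi, rfl⟩
      rw [PySem.List.mem_pyRange_iff_of_pos hp0] at hi
      obtain ⟨h1, h2, h3⟩ := hi
      have hi0 : (0:Int) ≤ i := le_trans (by positivity) h1
      have hd : p ∣ i := by
        have := dvd_add h3 (⟨p, rfl⟩ : p ∣ p * p)
        simpa using this
      have hin : ((i.toNat : Int)) = i := Int.toNat_of_nonneg hi0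
      refine ⟨⟨?_, ?_⟩, by omega⟩
      · have : (p.toNat : Int) ∣ (i.toNat : Int) := by rw [hpn, hin]; exact hd
        exact_mod_cast this
      · have : (p.toNat : Int) * (p.toNat : Int) ≤ (i.toNat : Int) := by
          rw [hpn, hin]; exact h1
        exact_mod_cast this
    · rintro ⟨⟨hd, hsq⟩, hlt⟩
      refine ⟨(j : Int), ?_, by simp⟩
      rw [PySem.List.mem_pyRange_iff_of_pos hp0]
      have hd' : p ∣ (j : Int) := by rw [← hpn]; exact_mod_cast hd
      refine ⟨?_, by exact_mod_cast hlt, ?_⟩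
      · have : (p.toNat : Int) * (p.toNat : Int) ≤ (j : Int) := by exact_mod_cast hsq
        rw [hpn] at this; exact this
      · exact dvd_sub hd' (⟨p, rfl⟩ : p ∣ p * p)
  by_cases hc : p.toNat ∣ j ∧ p.toNat * p.toNat ≤ j
  · rw [if_pos (hcond.mpr ⟨hc, hj⟩), if_pos hc]
  · rw [if_neg (fun h => hc (hcond.mp h).1), if_neg hc]

theorem pvL0_getD (j : Nat) (hj : j < 10000) :
    pvL0.getD j false = decide (2 ≤ j) := by
  unfold pvL0
  rw [List.getD_eq_getElem?_getD, List.getElem?_set, List.getElem?_set,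
    List.length_set, List.length_replicate, List.getElem?_replicate]
  match j with
  | 0 => norm_num
  | 1 => norm_num
  | (j + 2) =>
    rw [if_neg (by omega), if_neg (by omega), if_pos (by omega)]
    simp

theorem pvGood_succ (k j : Nat) :
    pvGood (k + 1) j ↔ pvGood k j ∧ (2 ≤ k → k ∣ j → ¬ (k * k ≤ j)) := by
  unfold pvGood
  constructor
  · rintro ⟨h2, h⟩
    exact ⟨⟨h2, fun q a b c => h q a (by omega) c⟩, fun a b => h k a (by omega) b⟩
  · rintro ⟨⟨h2, h⟩, hk⟩
    refine ⟨h2, fun q hq hlt hd => ?_⟩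
    rcases Nat.lt_succ_iff_lt_or_eq.mp hlt with h' | rfl
    · exact h q hq h' hd
    · exact hk hq hd

theorem pvGood_succ_of_not (k j : Nat) (hk : ¬ pvGood k k) :
    pvGood (k + 1) j ↔ pvGood k j := by
  rw [pvGood_succ]
  constructor
  · exact fun h => h.1
  · intro hgj
    refine ⟨hgj, fun hk2 hkj hsq => ?_⟩
    unfold pvGood at hk
    push_neg at hk
    obtain ⟨q, hq2, hqk, hqd, hqq⟩ := hk hk2
    have hqj : q ∣ j := dvd_trans hqd hkj
    have hkj' : k ≤ j := le_trans (Nat.le_mul_of_pos_left k (by omega)) hsq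
    have : q * q ≤ j := le_trans hqq hkj'
    exact hgj.2 q hq2 (by omega) hqj this

theorem pvSieve_inv (k : Nat) (hk : k ≤ 100) :
    ((List.range k).foldl (fun (acc : List Bool) (t : Nat) => pvSieveStep acc ((0:Int) + (t : Int))) pvL0).length = 10000 ∧
    ∀ j, j < 10000 →
      (((List.range k).foldl (fun (acc : List Bool) (t : Nat) => pvSieveStep acc ((0:Int) + (t : Int))) pvL0).getD j false = true
        ↔ pvGood k j) := by
  induction k with
  | zero =>
    refine ⟨?_, ?_⟩
    · rw [List.range_zero, List.foldl_nil]
      unfold pvL0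
      rw [List.length_set, List.length_set, List.length_replicate]
    · intro j hj
      rw [List.range_zero, List.foldl_nil, pvL0_getD j hj]
      unfold pvGood
      constructor
      · intro h
        exact ⟨of_decide_eq_true h, fun q _ hq => by omega⟩
      · rintro ⟨h2, -⟩
        exact decide_eq_true h2
  | succ k ih =>
    obtain ⟨ihlen, ihval⟩ := ih (by omega)
    rw [List.range_succ, List.foldl_append, List.foldl_cons, List.foldl_nil]
    set acc := (List.range k).foldl (fun (acc : List Bool) (t : Nat) => pvSieveStep acc ((0:Int) + (t : Int))) pvL0 with hacc
    have hstep : pvSieveStep acc ((0:Int) + (k : Int)) =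
        if acc.getD k false = true then pvCrossOut acc ((k : Int)) else acc := by
      unfold pvSieveStep
      rw [zero_add, PySem.List.pyGetD_natCast]
    rw [hstep]
    by_cases hc : acc.getD k false = true
    · rw [if_pos hc]
      have hgk : pvGood k k := (ihval k (by omega)).mp hc
      have hk2 : 2 ≤ k := hgk.1
      have hk2' : (2:Int) ≤ (k : Int) := by exact_mod_cast hk2
      refine ⟨by rw [pvCrossOut_length, ihlen], ?_⟩
      intro j hj
      rw [pvCrossOut_getD acc _ hk2' j hj ihlen, pvGood_succ]
      have hkn : ((k : Int)).toNat = k := by simp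
      rw [hkn]
      by_cases hd : k ∣ j ∧ k * k ≤ j
      · rw [if_pos hd]
        apply iff_of_false
        · simp
        · rintro ⟨-, h⟩
          exact h hk2 hd.1 hd.2
      · rw [if_neg hd, ihval j hj]
        constructor
        · intro h; exact ⟨h, fun _ h1 h2 => hd ⟨h1, h2⟩⟩
        · exact fun h => h.1
    · rw [if_neg hc]
      have hgk : ¬ pvGood k k := fun h => hc ((ihval k (by omega)).mpr h)
      exact ⟨ihlen, fun j hj => by rw [ihval j hj, pvGood_succ_of_not k j hgk]⟩

theorem pvTrial_getD (j : Nat) (hj : j < 10000) :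
    (pvTrial.getD j false = true) ↔ pvGood 100 j := by
  have h1 : pvTrial.getD j false = pvIsPrimeTD ((j : Nat) : Int) := by
    unfold pvTrial
    rw [← PySem.List.pyGetD_natCast (n := j),
      show (10000:Int) = ((10000:Nat):Int) by norm_num]
    exact PySem.List.pyGetD_map_pyRange _ _ _ _ hj
  rw [h1]
  unfold pvIsPrimeTD
  rw [Bool.and_eq_true, decide_eq_true_iff, List.all_eq_true]
  have hjt : (((j : Nat) : Int)).toNat = j := by simp
  rw [hjt]
  constructor
  · rintro ⟨h2, hall⟩
    have h2' : 2 ≤ j := by exact_mod_cast h2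
    refine ⟨h2', fun q hq hlt hd hsq => ?_⟩
    have hqs : q ≤ Nat.sqrt j := Nat.le_sqrt.mpr hsq
    have hmem : (q : Int) ∈ PySem.List.pyRange 2 (Int.ofNat (Nat.sqrt j) + 1) 1 := by
      rw [PySem.List.mem_pyRange_one]
      constructor
      · exact_mod_cast hq
      · simp only [Int.ofNat_eq_natCast]
        omega
    have := hall _ hmem
    rw [decide_eq_true_iff, PySem.Int.mod_eq_zero_iff_dvd] at this
    exact this (Int.natCast_dvd_natCast.mpr hd)
  · rintro ⟨h2, hgood⟩
    refine ⟨by exact_mod_cast h2, fun d hmem => ?_⟩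
    rw [PySem.List.mem_pyRange_one] at hmem
    obtain ⟨hd2, hdlt⟩ := hmem
    rw [decide_eq_true_iff, PySem.Int.mod_eq_zero_iff_dvd]
    intro hdvd
    have hd0 : (0:Int) ≤ d := by omega
    have hdm : ((d.toNat : Nat) : Int) = d := Int.toNat_of_nonneg hd0
    have hm2 : 2 ≤ d.toNat := by omega
    have hms : d.toNat ≤ Nat.sqrt j := by
      simp only [Int.ofNat_eq_natCast] at hdlt
      omega
    have hmd : d.toNat ∣ j := by
      rw [← Int.natCast_dvd_natCast, hdm]
      exact hdvd
    have hsq : d.toNat * d.toNat ≤ j := Nat.le_sqrt.mp hms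
    have hlt100 : d.toNat < 100 := by
      by_contra h
      push_neg at h
      have := Nat.mul_le_mul h h
      omega
    exact hgood d.toNat hm2 hlt100 hmd hsq

theorem pvSieve_as_foldl : pvSieve = (List.range 100).foldl (fun (acc : List Bool) (t : Nat) => pvSieveStep acc ((0:Int) + (t : Int))) pvL0 := by
  unfold pvSieve
  rw [PySem.List.pyRange_one, show ((100:Int) - 0).toNat = 100 by decide, List.foldl_map]

theorem pvTrial_length : pvTrial.length = 10000 := by
  unfold pvTrial
  rw [List.length_map, PySem.List.length_pyRange_one]
  decide

theorem pv_tables_eq : pvSieve = pvTrial := by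
  have hinv := pvSieve_inv 100 le_rfl
  rw [← pvSieve_as_foldl] at hinv
  obtain ⟨hlen, hval⟩ := hinv
  apply List.ext_getElem (by rw [hlen, pvTrial_length])
  intro j h1 h2
  have hj : j < 10000 := by rw [hlen] at h1; exact h1
  have hs : pvSieve.getD j false = true ↔ pvGood 100 j := hval j hj
  have ht : pvTrial.getD j false = true ↔ pvGood 100 j := pvTrial_getD j hj
  rw [List.getD_eq_getElem _ _ h1] at hs
  rw [List.getD_eq_getElem _ _ h2] at ht
  exact Bool.eq_iff_iff.mpr (hs.trans ht.symm)

-- ===== VERDICT (by name: the statement is the Claim_ definition above) =====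
theorem NextNPrimesUnderTenThousand_spec : Claim_equal_NextNPrimesUnderTenThousand := by
  intro startingnumber primesToSkip _ _
  unfold Spec_NextNPrimesUnderTenThousand NextNPrimesUnderTenThousand NextNPrimesUnderTenThousand_alt
  rw [pv_tables_eq]
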